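-- pv_equiv track=rewrite | github.com/dsardelic/AdventOfCode2023 | aoc2023/day_08_part_2.py | cycle_entry_data
-- ===== SOURCE A (Python) =====
-- import collections
--
-- CycleEntryData = collections.namedtuple(
--     "CycleEntryData", "entry_node instruction_index cycle_period steps_before_entry"
-- )
--
-- def instruction_at_index(instructions, index):
--     return instructions[index % len(instructions)]
--
-- def cycle_entry_data(start_node, node_to_neighbors, instructions):
--     node = start_node
--     distance_per_visited = {}
--     steps = 0
--     while True:
--         neighbor = node_to_neighbors[node][instruction_at_index(instructions, steps)]
--         to_be_executed_instruction_index = (steps + 1) % len(instructions)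
--         if prev_distance := distance_per_visited.get(
--             (neighbor, to_be_executed_instruction_index)
--         ):
--             return CycleEntryData(
--                 entry_node=neighbor,
--                 instruction_index=to_be_executed_instruction_index,
--                 cycle_period=steps + 1 - prev_distance,
--                 steps_before_entry=prev_distance,
--             )
--         distance_per_visited[(neighbor, to_be_executed_instruction_index)] = steps + 1
--         node = neighbor
--         steps += 1
-- ===== SOURCE B (Python) =====
-- def cycle_entry_data(start_node, node_to_neighbors, instructions):
--     n = len(instructions)
--
--     def step(state):
--         node, i = state
--         return (node_to_neighbors[node][instructions[i]], (i + 1) % n)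
--
--     # After N = len(node_to_neighbors) * n further steps the walk is inside its cycle.
--     N = len(node_to_neighbors) * n
--     first = step((start_node, 0))
--     p = first
--     for _ in range(N):
--         p = step(p)
--     # cycle length: walk once around the cycle starting from p
--     lam = 1
--     q = step(p)
--     while q != p:
--         q = step(q)
--         lam += 1
--     # cycle entry: advance two pointers lam apart until they meet
--     a = first
--     b = a
--     for _ in range(lam):
--         b = step(b)
--     mu = 0
--     while a != b:
--         a = step(a)
--         b = step(b)
--         mu += 1
--     return (a[0], a[1], lam, mu + 1)
-- ===== Notes on version B (the rewrite author's own statement) =====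
-- stated objective: alternative
-- what changed: Replaced the visited-state hash map (state -> first-visit distance) by an O(1)-memory pointer algorithm over the state-successor function: jump |graph|*|instructions| steps to land inside the cycle, walk once around it to get the period, then advance two pointers period apart from the first state to find the entry.
import Mathlib
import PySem

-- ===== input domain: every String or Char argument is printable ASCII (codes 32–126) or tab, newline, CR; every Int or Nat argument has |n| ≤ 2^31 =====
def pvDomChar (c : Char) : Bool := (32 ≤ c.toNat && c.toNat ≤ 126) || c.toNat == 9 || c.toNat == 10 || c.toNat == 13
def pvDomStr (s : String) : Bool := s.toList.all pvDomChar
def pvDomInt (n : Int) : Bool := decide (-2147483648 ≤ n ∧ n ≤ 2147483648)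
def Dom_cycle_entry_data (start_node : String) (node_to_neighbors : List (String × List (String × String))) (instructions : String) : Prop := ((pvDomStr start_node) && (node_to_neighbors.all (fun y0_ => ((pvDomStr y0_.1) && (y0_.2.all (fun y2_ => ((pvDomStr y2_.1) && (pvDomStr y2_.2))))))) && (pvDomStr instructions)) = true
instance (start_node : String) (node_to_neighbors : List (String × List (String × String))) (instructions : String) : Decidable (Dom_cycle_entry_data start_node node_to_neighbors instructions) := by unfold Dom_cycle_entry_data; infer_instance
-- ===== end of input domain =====

-- B replaces A's visited-state hash map by an O(1)-memory pointer algorithm over the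
-- state-successor function (jump into the cycle, measure the period, then find the entry
-- with two pointers a period apart); same return value, different algorithm (not faster).


-- ===== PORT A =====
-- instructions[index % len(instructions)]; Python's dict is indexed by the character, so the
-- port returns the one-character string (the "" branches are unreachable inside Pre_, where
-- Python would raise instead).
def instruction_at_index (instructions : String) (index : Int) : String :=
  match PySem.Str.pyGet? instructions (PySem.Int.mod index (PySem.Str.len instructions)) with
  | some c => String.ofList [c]
  | none => ""

-- the while-True loop of A, as fuel recursion; the fuel (#nodes * #instructions + 1) is a
-- strict upper bound on the number of iterations the Python loop performs inside Pre_
def aLoop (node_to_neighbors : List (String × List (String × String))) (instructions : String) :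
    Nat → String → PySem.Dict (String × Int) Int → Int → String × Int × Int × Int
  | 0, _, _, _ => ("", 0, 0, 0)
  | fuel+1, node, dist, steps =>
    let inner := ((PySem.Dict.mk node_to_neighbors).get? node).getD []
    let neighbor := ((PySem.Dict.mk inner).get? (instruction_at_index instructions steps)).getD ""
    let idx := PySem.Int.mod (steps + 1) (PySem.Str.len instructions)
    let prev := (dist.get? (neighbor, idx)).getD 0   -- walrus: truthy iff present and ≠ 0
    if prev ≠ 0 then (neighbor, idx, steps + 1 - prev, prev)
    else aLoop node_to_neighbors instructions fuel neighbor (dist.insert (neighbor, idx) (steps + 1)) (steps + 1)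

def cycle_entry_data (start_node : String) (node_to_neighbors : List (String × List (String × String))) (instructions : String) : String × Int × Int × Int :=
  aLoop node_to_neighbors instructions (node_to_neighbors.length * instructions.toList.length + 1)
    start_node PySem.Dict.empty 0

-- ===== PORT B =====
-- step((node, i)) = (node_to_neighbors[node][instructions[i]], (i+1) % n)
def bStep (node_to_neighbors : List (String × List (String × String))) (instructions : String)
    (s : String × Int) : String × Int :=
  let inner := ((PySem.Dict.mk node_to_neighbors).get? s.1).getD []
  let key := match PySem.Str.pyGet? instructions s.2 with | some c => String.ofList [c] | none => ""
  (((PySem.Dict.mk inner).get? key).getD "", PySem.Int.mod (s.2 + 1) (PySem.Str.len instructions))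

-- for _ in range(k): s = step(s)
def bIter (step : String × Int → String × Int) : Nat → String × Int → String × Int
  | 0, s => s
  | k+1, s => bIter step k (step s)

-- lam = 1; q = step(p); while q != p: q = step(q); lam += 1   (fuel recursion)
def bLamLoop (step : String × Int → String × Int) :
    Nat → String × Int → String × Int → Int → Int
  | 0, _, _, lam => lam
  | fuel+1, p, q, lam => if q = p then lam else bLamLoop step fuel p (step q) (lam + 1)

-- mu = 0; while a != b: a = step(a); b = step(b); mu += 1   (fuel recursion)
def bMuLoop (step : String × Int → String × Int) :
    Nat → String × Int → String × Int → Int → (String × Int) × Int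
  | 0, a, _, mu => (a, mu)
  | fuel+1, a, b, mu => if a = b then (a, mu) else bMuLoop step fuel (step a) (step b) (mu + 1)

def cycle_entry_data_alt (start_node : String) (node_to_neighbors : List (String × List (String × String))) (instructions : String) : String × Int × Int × Int :=
  let step := bStep node_to_neighbors instructions
  let N := node_to_neighbors.length * instructions.toList.length
  let first := step (start_node, 0)
  let p := bIter step N first
  let lam := bLamLoop step (N + 1) p (step p) 1
  let b := bIter step lam.toNat first
  let r := bMuLoop step (N + 1) first b 0
  (r.1.1, r.1.2, lam, r.2 + 1)

-- ===== PRECONDITION & SPEC =====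
-- graph-reachability helpers used by the precondition (a structural well-formedness
-- condition on the input graph; NOT the ports' walk: it ignores instruction order)
def pvAllVals (node_to_neighbors : List (String × List (String × String))) : List String :=
  node_to_neighbors.flatMap (fun p => p.2.map Prod.snd)

-- the neighbors of v along edges labelled by any instruction character
def pvSuccs (node_to_neighbors : List (String × List (String × String)))
    (instructions : String) (v : String) : List String :=
  match (PySem.Dict.mk node_to_neighbors).get? v with
  | none => []
  | some d => instructions.toList.filterMap
      (fun c => (PySem.Dict.mk d).get? (String.ofList [c]))

-- v is present in the map and carries an edge for every instruction character
def pvWfNode (node_to_neighbors : List (String × List (String × String)))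
    (instructions : String) (v : String) : Bool :=
  match (PySem.Dict.mk node_to_neighbors).get? v with
  | none => false
  | some d => instructions.toList.all
      (fun c => ((PySem.Dict.mk d).get? (String.ofList [c])).isSome)

-- nodes reachable from the start in at most k steps along instruction-labelled edges
def pvReach (node_to_neighbors : List (String × List (String × String)))
    (instructions : String) (start_node : String) : ℕ → List String
  | 0 => [start_node]
  | k + 1 =>
    ((pvReach node_to_neighbors instructions start_node k)
      ++ (pvReach node_to_neighbors instructions start_node k).flatMap
          (pvSuccs node_to_neighbors instructions)).dedup

-- enough iterations to exhaust every node the closure can ever add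
def pvK (node_to_neighbors : List (String × List (String × String))) : ℕ :=
  (pvAllVals node_to_neighbors).length + 1

-- Pre_ excludes the inputs on which the Python walk raises (KeyError on a missing node or
-- instruction key, ZeroDivisionError on empty instructions). The walk's exact domain is not
-- a closed-form condition, so Pre_ requires every node REACHABLE from the start along
-- instruction-labelled edges to carry an edge for every instruction character; that is
-- slightly stronger than A needs: A also returns when a reachable node lacks a character
-- the walk never consumes at that node (see cites).
def Pre_cycle_entry_data (start_node : String) (node_to_neighbors : List (String × List (String × String))) (instructions : String) : Prop :=
  (!(instructions.toList.isEmpty)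
   && (pvReach node_to_neighbors instructions start_node (pvK node_to_neighbors)).all
        (pvWfNode node_to_neighbors instructions)) = true
instance (start_node : String) (node_to_neighbors : List (String × List (String × String))) (instructions : String) : Decidable (Pre_cycle_entry_data start_node node_to_neighbors instructions) := by unfold Pre_cycle_entry_data; infer_instance

def pvWitness_cycle_entry_data : String × (List (String × List (String × String))) × String :=
  ("A", [("A", [("L", "B"), ("R", "A")]), ("B", [("L", "A"), ("R", "B")])], "LR")

def Spec_cycle_entry_data (start_node : String) (node_to_neighbors : List (String × List (String × String))) (instructions : String) (out : String × Int × Int × Int) : Prop := out = cycle_entry_data_alt start_node node_to_neighbors instructions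
instance (start_node : String) (node_to_neighbors : List (String × List (String × String))) (instructions : String) (out : String × Int × Int × Int) : Decidable (Spec_cycle_entry_data start_node node_to_neighbors instructions out) := by unfold Spec_cycle_entry_data; infer_instance

-- ===== CLAIM (what is proved, stated in full; the proofs are below) =====
def Claim_equal_cycle_entry_data : Prop := ∀ (start_node : String) (node_to_neighbors : List (String × List (String × String))) (instructions : String), Dom_cycle_entry_data start_node node_to_neighbors instructions → Pre_cycle_entry_data start_node node_to_neighbors instructions → Spec_cycle_entry_data start_node node_to_neighbors instructions (cycle_entry_data start_node node_to_neighbors instructions)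

-- ===== LEMMAS AND PROOFS =====

-- Throughout, the walk is described by the successor function f := bStep nbrs instr on
-- states (node, instruction index), and u i := f^[i] x with x := f (start, 0) the state
-- after i+1 Python steps (A never records the start state).

-- index rewriting helper
theorem pvIterCongr {α : Type} (f : α → α) (x : α) {i j : ℕ} (h : i = j) :
    f^[i] x = f^[j] x := by rw [h]

theorem pvIterShift {α : Type} (f : α → α) (x : α) {i j : ℕ}
    (h : f^[i] x = f^[j] x) (t : ℕ) : f^[i + t] x = f^[j + t] x := by
  rw [Nat.add_comm i t, Nat.add_comm j t, Function.iterate_add_apply,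
    Function.iterate_add_apply, h]

-- the period lam works at every index ≥ mu
theorem pvPeriodAt {α : Type} (f : α → α) (x : α) (mu lam : ℕ)
    (hper : f^[mu + lam] x = f^[mu] x) (t : ℕ) :
    f^[(mu + t) + lam] x = f^[mu + t] x := by
  have h := pvIterShift f x hper t
  calc f^[(mu + t) + lam] x = f^[(mu + lam) + t] x := pvIterCongr f x (by omega)
    _ = f^[mu + t] x := h

theorem pvPeriodMul {α : Type} (f : α → α) (x : α) (mu lam : ℕ)
    (hper : f^[mu + lam] x = f^[mu] x) (t : ℕ) : ∀ k : ℕ,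
    f^[mu + t + k * lam] x = f^[mu + t] x := by
  intro k
  induction k with
  | zero => simp
  | succ k ih =>
    calc f^[mu + t + (k + 1) * lam] x
        = f^[(mu + (t + k * lam)) + lam] x := pvIterCongr f x (by ring)
      _ = f^[mu + (t + k * lam)] x := pvPeriodAt f x mu lam hper (t + k * lam)
      _ = f^[mu + t + k * lam] x := pvIterCongr f x (by ring)
      _ = f^[mu + t] x := ih

-- the cycle states u mu, …, u (mu+lam-1) are pairwise distinct
theorem pvCycleInjAux {α : Type} (f : α → α) (x : α) (mu lam : ℕ)
    (hper : f^[mu + lam] x = f^[mu] x)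
    (hlmin : ∀ p, p ≠ 0 → f^[mu + p] x = f^[mu] x → lam ≤ p)
    {a b : ℕ} (hab : a ≤ b) (hb : b < lam) (h : f^[mu + a] x = f^[mu + b] x) :
    a = b := by
  rcases Nat.eq_or_lt_of_le hab with h' | h'
  · exact h'
  · exfalso
    have hsh := pvIterShift f x h (lam - b)
    have h1 : f^[mu + b + (lam - b)] x = f^[mu] x := by
      calc f^[mu + b + (lam - b)] x = f^[mu + lam] x := pvIterCongr f x (by omega)
        _ = f^[mu] x := hper
    have h2 : f^[mu + (a + (lam - b))] x = f^[mu] x := by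
      calc f^[mu + (a + (lam - b))] x = f^[mu + a + (lam - b)] x := pvIterCongr f x (by omega)
        _ = f^[mu + b + (lam - b)] x := hsh
        _ = f^[mu] x := h1
    have := hlmin (a + (lam - b)) (by omega) h2
    omega

theorem pvCycleInj {α : Type} (f : α → α) (x : α) (mu lam : ℕ)
    (hper : f^[mu + lam] x = f^[mu] x)
    (hlmin : ∀ p, p ≠ 0 → f^[mu + p] x = f^[mu] x → lam ≤ p)
    {a b : ℕ} (ha : a < lam) (hb : b < lam) (h : f^[mu + a] x = f^[mu + b] x) :
    a = b := by
  rcases Nat.le_total a b with h' | h'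
  · exact pvCycleInjAux f x mu lam hper hlmin h' hb h
  · exact (pvCycleInjAux f x mu lam hper hlmin h' ha h.symm).symm

-- every state at index ≥ mu is the cycle state at the reduced index
theorem pvOnCycle {α : Type} (f : α → α) (x : α) (mu lam : ℕ)
    (hper : f^[mu + lam] x = f^[mu] x) (_hpos : lam ≠ 0)
    {i : ℕ} (hi : mu ≤ i) : f^[i] x = f^[mu + (i - mu) % lam] x := by
  calc f^[i] x = f^[mu + (i - mu) % lam + ((i - mu) / lam) * lam] x := by
        apply pvIterCongr
        have hmd : (i - mu) % lam + ((i - mu) / lam) * lam = i - mu := Nat.mod_add_div' _ _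
        omega
    _ = f^[mu + (i - mu) % lam] x := pvPeriodMul f x mu lam hper _ _

-- two equal states at indices ≥ mu differ by a multiple of the period
theorem pvEqDvd {α : Type} (f : α → α) (x : α) (mu lam : ℕ)
    (hper : f^[mu + lam] x = f^[mu] x) (hpos : lam ≠ 0)
    (hlmin : ∀ p, p ≠ 0 → f^[mu + p] x = f^[mu] x → lam ≤ p)
    {i j : ℕ} (hi : mu ≤ i) (hij : i ≤ j) (h : f^[i] x = f^[j] x) :
    lam ∣ (j - i) := by
  have hlam : 0 < lam := Nat.pos_of_ne_zero hpos
  have h1 := pvOnCycle f x mu lam hper hpos hi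
  have h2 := pvOnCycle f x mu lam hper hpos (le_trans hi hij)
  have hmods : (i - mu) % lam = (j - mu) % lam :=
    pvCycleInj f x mu lam hper hlmin (Nat.mod_lt _ hlam) (Nat.mod_lt _ hlam)
      (h1.symm.trans (h.trans h2))
  have hmeq : Nat.ModEq lam (i - mu) (j - mu) := hmods
  have := (Nat.modEq_iff_dvd' (by omega)).mp hmeq
  have heq : (j - mu) - (i - mu) = j - i := by omega
  rwa [heq] at this

-- ---------- the concrete walk ----------

-- A's node/state sequence from the start state (w 0 = (start, 0), w (m+1) = f (w m))
def pvW (start_node : String) (node_to_neighbors : List (String × List (String × String)))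
    (instructions : String) : ℕ → String × Int
  | 0 => (start_node, 0)
  | m + 1 => bStep node_to_neighbors instructions (pvW start_node node_to_neighbors instructions m)

theorem pvW_succ (start_node : String) (node_to_neighbors : List (String × List (String × String)))
    (instructions : String) (m : ℕ) :
    pvW start_node node_to_neighbors instructions (m + 1)
      = (bStep node_to_neighbors instructions)^[m]
          (bStep node_to_neighbors instructions (start_node, 0)) := by
  induction m with
  | zero => rfl
  | succ m ih =>
    show bStep node_to_neighbors instructions (pvW start_node node_to_neighbors instructions (m+1)) = _
    rw [ih, ← Function.iterate_succ_apply' (bStep node_to_neighbors instructions)]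

-- association-list / Dict lookup facts
theorem pvGetMem {ν : Type} (l : List (String × ν)) (k : String) (v : ν)
    (h : (PySem.Dict.mk l).get? k = some v) : (k, v) ∈ l := by
  induction l with
  | nil => simp [PySem.Dict.get?] at h
  | cons p rest ih =>
    rw [show (PySem.Dict.mk (p :: rest)) = (PySem.Dict.mk ((p.1, p.2) :: rest)) by rfl,
      PySem.Dict.get?_mk_cons] at h
    by_cases hk : p.1 == k
    · simp only [hk, if_pos] at h
      obtain ⟨a, b⟩ := p
      have ha : a = k := by simpa using hk
      have hb : b = v := by simpa using h
      subst ha; subst hb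
      exact List.mem_cons_self
    · simp only [hk, Bool.false_eq_true, if_false] at h
      right; exact ih h

-- reading a character at a valid index
theorem pvCharAt (instructions : String) {i : Int}
    (h0 : 0 ≤ i) (hn : i < (instructions.toList.length : Int)) :
    ∃ c, PySem.Str.pyGet? instructions i = some c ∧ c ∈ instructions.toList := by
  have hi : i = ((i.toNat : ℕ) : Int) := by omega
  rw [hi, PySem.Str.pyGet?_natCast]
  have hlt : i.toNat < instructions.toList.length := by omega
  exact ⟨instructions.toList[i.toNat], by simp [List.getElem?_eq_getElem hlt],
    List.getElem_mem _⟩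

-- reachability closure lemmas
theorem pvMemReachSucc (node_to_neighbors : List (String × List (String × String)))
    (instructions : String) (start_node : String) (k : ℕ) (x : String) :
    x ∈ pvReach node_to_neighbors instructions start_node (k + 1)
      ↔ x ∈ pvReach node_to_neighbors instructions start_node k
        ∨ ∃ v ∈ pvReach node_to_neighbors instructions start_node k,
            x ∈ pvSuccs node_to_neighbors instructions v := by
  simp [pvReach, List.mem_dedup, List.mem_append, List.mem_flatMap]

theorem pvReachMonoLe (node_to_neighbors : List (String × List (String × String)))
    (instructions : String) (start_node : String) {k k' : ℕ} (hkk : k ≤ k') {x : String}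
    (hx : x ∈ pvReach node_to_neighbors instructions start_node k) :
    x ∈ pvReach node_to_neighbors instructions start_node k' := by
  induction k' with
  | zero => have : k = 0 := by omega
            subst this; exact hx
  | succ k' ih =>
    rcases Nat.eq_or_lt_of_le hkk with he | hl
    · subst he; exact hx
    · exact (pvMemReachSucc node_to_neighbors instructions start_node k' x).mpr
        (Or.inl (ih (by omega)))

theorem pvStabStep (node_to_neighbors : List (String × List (String × String)))
    (instructions : String) (start_node : String) {k : ℕ}
    (h : ∀ x, x ∈ pvReach node_to_neighbors instructions start_node (k + 1)
      → x ∈ pvReach node_to_neighbors instructions start_node k) :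
    ∀ x, x ∈ pvReach node_to_neighbors instructions start_node (k + 2)
      → x ∈ pvReach node_to_neighbors instructions start_node (k + 1) := by
  intro x hx
  rw [pvMemReachSucc] at hx
  rw [pvMemReachSucc]
  rcases hx with hx | ⟨v, hv, hs⟩
  · exact Or.inl (h x hx)
  · exact Or.inr ⟨v, h v hv, hs⟩

theorem pvStabAll (node_to_neighbors : List (String × List (String × String)))
    (instructions : String) (start_node : String) {k : ℕ}
    (h : ∀ x, x ∈ pvReach node_to_neighbors instructions start_node (k + 1)
      → x ∈ pvReach node_to_neighbors instructions start_node k) :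
    ∀ j x, x ∈ pvReach node_to_neighbors instructions start_node (k + j)
      → x ∈ pvReach node_to_neighbors instructions start_node k := by
  have hup : ∀ j, ∀ x, x ∈ pvReach node_to_neighbors instructions start_node (k + j + 1)
      → x ∈ pvReach node_to_neighbors instructions start_node (k + j) := by
    intro j
    induction j with
    | zero => exact h
    | succ j ih => exact pvStabStep node_to_neighbors instructions start_node ih
  intro j
  induction j with
  | zero => exact fun x hx => hx
  | succ j ih => exact fun x hx => ih x (hup j x hx)

theorem pvSuccsSub (node_to_neighbors : List (String × List (String × String)))
    (instructions : String) (v x : String)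
    (hx : x ∈ pvSuccs node_to_neighbors instructions v) : x ∈ pvAllVals node_to_neighbors := by
  unfold pvSuccs at hx
  cases hg : (PySem.Dict.mk node_to_neighbors).get? v with
  | none => rw [hg] at hx; cases hx
  | some d =>
    rw [hg] at hx
    obtain ⟨c, _, hc⟩ := List.mem_filterMap.mp hx
    exact List.mem_flatMap.mpr ⟨(v, d), pvGetMem _ _ _ hg,
      List.mem_map.mpr ⟨(String.ofList [c], x), pvGetMem _ _ _ hc, rfl⟩⟩

theorem pvReachSub (node_to_neighbors : List (String × List (String × String)))
    (instructions : String) (start_node : String) :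
    ∀ k x, x ∈ pvReach node_to_neighbors instructions start_node k
      → x ∈ start_node :: pvAllVals node_to_neighbors := by
  intro k
  induction k with
  | zero => intro x hx; simp [pvReach] at hx; simp [hx]
  | succ k ih =>
    intro x hx
    rcases (pvMemReachSucc node_to_neighbors instructions start_node k x).mp hx with
      hx | ⟨v, _, hs⟩
    · exact ih x hx
    · exact List.mem_cons_of_mem _ (pvSuccsSub node_to_neighbors instructions v x hs)

theorem pvStartMem (node_to_neighbors : List (String × List (String × String)))
    (instructions : String) (start_node : String) :
    ∀ k, start_node ∈ pvReach node_to_neighbors instructions start_node k := by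
  intro k
  induction k with
  | zero => simp [pvReach]
  | succ k ih =>
    exact (pvMemReachSucc node_to_neighbors instructions start_node k start_node).mpr
      (Or.inl ih)

theorem pvStabExists (node_to_neighbors : List (String × List (String × String)))
    (instructions : String) (start_node : String) :
    ∃ k < pvK node_to_neighbors,
      ∀ x, x ∈ pvReach node_to_neighbors instructions start_node (k + 1)
        → x ∈ pvReach node_to_neighbors instructions start_node k := by
  by_contra hcon
  have hcon' : ∀ k, k < pvK node_to_neighbors →
      ∃ x, x ∈ pvReach node_to_neighbors instructions start_node (k + 1)
        ∧ x ∉ pvReach node_to_neighbors instructions start_node k := by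
    intro k hk
    by_contra hx
    exact hcon ⟨k, hk, fun x hxx => by
      by_contra hmem
      exact hx ⟨x, hxx, hmem⟩⟩
  have hcard : ∀ k, k ≤ pvK node_to_neighbors →
      k + 1 ≤ (pvReach node_to_neighbors instructions start_node k).toFinset.card := by
    intro k
    induction k with
    | zero => intro _; simp [pvReach]
    | succ k ih =>
      intro hk
      obtain ⟨x, hx1, hx0⟩ := hcon' k (by omega)
      have hss : (pvReach node_to_neighbors instructions start_node k).toFinset
          ⊂ (pvReach node_to_neighbors instructions start_node (k + 1)).toFinset := by
        constructor
        · intro y hy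
          exact List.mem_toFinset.mpr
            ((pvMemReachSucc node_to_neighbors instructions start_node k y).mpr
              (Or.inl (List.mem_toFinset.mp hy)))
        · intro hsub
          exact hx0 (List.mem_toFinset.mp (hsub (List.mem_toFinset.mpr hx1)))
      have := Finset.card_lt_card hss
      have := ih (by omega)
      omega
  have hK := hcard (pvK node_to_neighbors) le_rfl
  have hsub : (pvReach node_to_neighbors instructions start_node (pvK node_to_neighbors)).toFinset
      ⊆ (start_node :: pvAllVals node_to_neighbors).toFinset := by
    intro x hx
    exact List.mem_toFinset.mpr (pvReachSub node_to_neighbors instructions start_node _ x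
      (List.mem_toFinset.mp hx))
  have h1 := Finset.card_le_card hsub
  have h2 := List.toFinset_card_le (start_node :: pvAllVals node_to_neighbors)
  have h3 : (start_node :: pvAllVals node_to_neighbors).length
      = pvK node_to_neighbors := by simp [pvK]
  omega

theorem pvReachClosed (node_to_neighbors : List (String × List (String × String)))
    (instructions : String) (start_node : String) :
    ∀ v ∈ pvReach node_to_neighbors instructions start_node (pvK node_to_neighbors),
      ∀ w ∈ pvSuccs node_to_neighbors instructions v,
        w ∈ pvReach node_to_neighbors instructions start_node (pvK node_to_neighbors) := by
  obtain ⟨k, hkK, hstab⟩ := pvStabExists node_to_neighbors instructions start_node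
  intro v hv w hw
  have hvk : v ∈ pvReach node_to_neighbors instructions start_node k := by
    apply pvStabAll node_to_neighbors instructions start_node hstab (pvK node_to_neighbors - k)
    rw [show k + (pvK node_to_neighbors - k) = pvK node_to_neighbors from by omega]
    exact hv
  have hw1 : w ∈ pvReach node_to_neighbors instructions start_node (k + 1) :=
    (pvMemReachSucc node_to_neighbors instructions start_node k w).mpr (Or.inr ⟨v, hvk, hw⟩)
  exact pvReachMonoLe node_to_neighbors instructions start_node (by omega) (hstab w hw1)

-- unpacking the well-formedness bit
theorem pvWfSpec (node_to_neighbors : List (String × List (String × String)))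
    (instructions : String) (v : String)
    (h : pvWfNode node_to_neighbors instructions v = true) :
    ∃ d, (PySem.Dict.mk node_to_neighbors).get? v = some d ∧
      ∀ c ∈ instructions.toList,
        ∃ w, (PySem.Dict.mk d).get? (String.ofList [c]) = some w := by
  unfold pvWfNode at h
  cases hg : (PySem.Dict.mk node_to_neighbors).get? v with
  | none => rw [hg] at h; cases h
  | some d =>
    rw [hg] at h
    exact ⟨d, rfl, fun c hc =>
      Option.isSome_iff_exists.mp ((List.all_eq_true.mp h) c hc)⟩

theorem pvWfKey (node_to_neighbors : List (String × List (String × String)))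
    (instructions : String) (v : String)
    (h : pvWfNode node_to_neighbors instructions v = true) :
    v ∈ node_to_neighbors.map Prod.fst := by
  obtain ⟨d, hd, _⟩ := pvWfSpec node_to_neighbors instructions v h
  exact List.mem_map.mpr ⟨(v, d), pvGetMem _ _ _ hd, rfl⟩

-- valid states: node stays reachable, index is in [0, n)
theorem pvStepValid (node_to_neighbors : List (String × List (String × String)))
    (instructions : String) (start_node : String)
    (hne : instructions.toList ≠ [])
    (hwfAll : ∀ v ∈ pvReach node_to_neighbors instructions start_node (pvK node_to_neighbors),
      pvWfNode node_to_neighbors instructions v = true)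
    (s : String × Int)
    (hs : s.1 ∈ pvReach node_to_neighbors instructions start_node (pvK node_to_neighbors)
      ∧ 0 ≤ s.2 ∧ s.2 < (instructions.toList.length : Int)) :
    (bStep node_to_neighbors instructions s).1
        ∈ pvReach node_to_neighbors instructions start_node (pvK node_to_neighbors)
      ∧ 0 ≤ (bStep node_to_neighbors instructions s).2
      ∧ (bStep node_to_neighbors instructions s).2 < (instructions.toList.length : Int) := by
  obtain ⟨h1, h2, h3⟩ := hs
  have hn : (0 : Int) < (instructions.toList.length : Int) := by
    have : instructions.toList.length ≠ 0 := by simpa using hne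
    omega
  obtain ⟨d, hd, hall⟩ := pvWfSpec node_to_neighbors instructions s.1 (hwfAll s.1 h1)
  obtain ⟨c, hc, hcmem⟩ := pvCharAt instructions h2 h3
  obtain ⟨w, hw⟩ := hall c hcmem
  refine ⟨?_, ?_, ?_⟩
  · show (((PySem.Dict.mk (((PySem.Dict.mk node_to_neighbors).get? s.1).getD [])).get? _).getD "") ∈ _
    rw [hd]
    simp only [Option.getD_some]
    rw [hc, hw]
    apply pvReachClosed node_to_neighbors instructions start_node s.1 h1
    unfold pvSuccs
    rw [hd]
    exact List.mem_filterMap.mpr ⟨c, hcmem, hw⟩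
  · show (0 : Int) ≤ PySem.Int.mod (s.2 + 1) (PySem.Str.len instructions)
    rw [PySem.Str.len_eq, PySem.Int.mod_eq_emod_of_pos (by exact_mod_cast hn)]
    exact Int.emod_nonneg _ (by omega)
  · show PySem.Int.mod (s.2 + 1) (PySem.Str.len instructions) < _
    rw [PySem.Str.len_eq, PySem.Int.mod_eq_emod_of_pos (by exact_mod_cast hn)]
    exact_mod_cast Int.emod_lt_of_pos _ (by exact_mod_cast hn)

theorem pvWValid (start_node : String) (node_to_neighbors : List (String × List (String × String)))
    (instructions : String)
    (hne : instructions.toList ≠ [])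
    (hwfAll : ∀ v ∈ pvReach node_to_neighbors instructions start_node (pvK node_to_neighbors),
      pvWfNode node_to_neighbors instructions v = true) :
    ∀ m, (pvW start_node node_to_neighbors instructions m).1
        ∈ pvReach node_to_neighbors instructions start_node (pvK node_to_neighbors)
      ∧ 0 ≤ (pvW start_node node_to_neighbors instructions m).2
      ∧ (pvW start_node node_to_neighbors instructions m).2
          < (instructions.toList.length : Int) := by
  intro m
  induction m with
  | zero =>
    have hlen : instructions.toList.length ≠ 0 := by simpa using hne
    refine ⟨pvStartMem node_to_neighbors instructions start_node _, by norm_num [pvW], ?_⟩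
    show (0 : Int) < (instructions.toList.length : Int)
    exact_mod_cast Nat.pos_of_ne_zero hlen
  | succ m ih =>
    exact pvStepValid node_to_neighbors instructions start_node hne hwfAll _ ih

-- the second component of the walk is the running instruction index
theorem pvEmodSucc (a n : Int) : (a % n + 1) % n = (a + 1) % n := by
  conv_rhs => rw [Int.add_emod]
  conv_lhs => rw [Int.add_emod, Int.emod_emod_of_dvd a dvd_rfl]

theorem pvWSnd (start_node : String) (node_to_neighbors : List (String × List (String × String)))
    (instructions : String) (hne : instructions.toList ≠ []) :
    ∀ m : ℕ, (pvW start_node node_to_neighbors instructions m).2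
      = (m : Int) % (instructions.toList.length : Int) := by
  have hn : (0 : Int) < (instructions.toList.length : Int) := by
    have : instructions.toList.length ≠ 0 := by simpa using hne
    omega
  intro m
  induction m with
  | zero => simp [pvW]
  | succ m ih =>
    show PySem.Int.mod ((pvW start_node node_to_neighbors instructions m).2 + 1)
        (PySem.Str.len instructions) = _
    rw [PySem.Str.len_eq, PySem.Int.mod_eq_emod_of_pos (by exact_mod_cast hn), ih,
      pvEmodSucc]
    push_cast
    ring_nf

-- A's loop body computes exactly one application of the successor function
theorem pvBodyStep (node_to_neighbors : List (String × List (String × String)))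
    (instructions : String) (hne : instructions.toList ≠ [])
    (s : String × Int) (m : ℕ)
    (h2 : s.2 = (m : Int) % (instructions.toList.length : Int)) :
    ((((PySem.Dict.mk (((PySem.Dict.mk node_to_neighbors).get? s.1).getD [])).get?
        (instruction_at_index instructions (m : Int))).getD ""),
      PySem.Int.mod ((m : Int) + 1) (PySem.Str.len instructions))
      = bStep node_to_neighbors instructions s := by
  have hn : (0 : Int) < (instructions.toList.length : Int) := by
    have : instructions.toList.length ≠ 0 := by simpa using hne
    omega
  have hlen : PySem.Str.len instructions = (instructions.toList.length : Int) :=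
    PySem.Str.len_eq instructions
  have hmod : PySem.Int.mod (m : Int) (PySem.Str.len instructions) = s.2 := by
    rw [hlen, PySem.Int.mod_eq_emod_of_pos (by exact_mod_cast hn), h2]
  have hidx : PySem.Int.mod ((m : Int) + 1) (PySem.Str.len instructions)
      = PySem.Int.mod (s.2 + 1) (PySem.Str.len instructions) := by
    rw [hlen, PySem.Int.mod_eq_emod_of_pos (by exact_mod_cast hn),
      PySem.Int.mod_eq_emod_of_pos (by exact_mod_cast hn), h2, pvEmodSucc]
  simp only [bStep]
  rw [hidx]
  unfold instruction_at_index
  rw [hmod]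

-- A's loop, run from iteration m with the correct visited dictionary, returns the
-- entry state, the period and the (1-based) entry distance
theorem pvALoopCorrect (start_node : String)
    (node_to_neighbors : List (String × List (String × String))) (instructions : String)
    (hne : instructions.toList ≠ [])
    (mu lam : ℕ)
    (hper : (bStep node_to_neighbors instructions)^[mu + lam]
        (bStep node_to_neighbors instructions (start_node, 0))
      = (bStep node_to_neighbors instructions)^[mu]
        (bStep node_to_neighbors instructions (start_node, 0)))
    (hpos : lam ≠ 0)
    (_hlmin : ∀ p, p ≠ 0 →
      (bStep node_to_neighbors instructions)^[mu + p]
          (bStep node_to_neighbors instructions (start_node, 0))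
        = (bStep node_to_neighbors instructions)^[mu]
          (bStep node_to_neighbors instructions (start_node, 0)) → lam ≤ p)
    (hnoearly : ∀ j m' : ℕ, j < m' → m' < mu + lam →
      (bStep node_to_neighbors instructions)^[j]
          (bStep node_to_neighbors instructions (start_node, 0))
        ≠ (bStep node_to_neighbors instructions)^[m']
          (bStep node_to_neighbors instructions (start_node, 0))) :
    ∀ (fuel m : ℕ) (d : PySem.Dict (String × Int) Int),
      m ≤ mu + lam → mu + lam < m + fuel →
      (∀ j, j < m → d.get? ((bStep node_to_neighbors instructions)^[j]
          (bStep node_to_neighbors instructions (start_node, 0))) = some ((j : Int) + 1)) →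
      (∀ s, (d.get? s).isSome → ∃ j, j < m ∧
        (bStep node_to_neighbors instructions)^[j]
          (bStep node_to_neighbors instructions (start_node, 0)) = s) →
      aLoop node_to_neighbors instructions fuel
          (pvW start_node node_to_neighbors instructions m).1 d (m : Int)
        = (((bStep node_to_neighbors instructions)^[mu]
              (bStep node_to_neighbors instructions (start_node, 0))).1,
            ((bStep node_to_neighbors instructions)^[mu]
              (bStep node_to_neighbors instructions (start_node, 0))).2,
            (lam : Int), (mu : Int) + 1) := by
  intro fuel
  induction fuel with
  | zero => intro m d h1 h2 _ _; omega
  | succ fuel ih =>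
    intro m d hm hfuel hI1 hI2
    set f := bStep node_to_neighbors instructions with hf
    set x := f (start_node, 0) with hx
    have hkey : ((((PySem.Dict.mk (((PySem.Dict.mk node_to_neighbors).get?
          (pvW start_node node_to_neighbors instructions m).1).getD [])).get?
          (instruction_at_index instructions (m : Int))).getD ""),
        PySem.Int.mod ((m : Int) + 1) (PySem.Str.len instructions)) = f^[m] x := by
      rw [pvBodyStep node_to_neighbors instructions hne
        (pvW start_node node_to_neighbors instructions m) m
        (pvWSnd start_node node_to_neighbors instructions hne m)]
      show f (pvW start_node node_to_neighbors instructions m) = _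
      rw [show f (pvW start_node node_to_neighbors instructions m)
          = pvW start_node node_to_neighbors instructions (m + 1) from rfl,
        pvW_succ]
    show aLoop node_to_neighbors instructions (fuel + 1) _ d (m : Int) = _
    rw [aLoop]
    rw [hkey]
    rcases Nat.eq_or_lt_of_le hm with hend | hmid
    · -- m = mu + lam: the key is the entry state, already in the dictionary
      have hcoll : f^[m] x = f^[mu] x := by rw [hend]; exact hper
      have hmu_lt : mu < m := by omega
      have hget : d.get? (f^[m] x) = some ((mu : Int) + 1) := by
        rw [hcoll]; exact hI1 mu hmu_lt
      obtain ⟨hk1, hk2⟩ := Prod.ext_iff.mp hkey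
      dsimp only at hk1 hk2
      rw [hget]
      simp only [Option.getD_some]
      rw [if_pos (by omega : (mu : Int) + 1 ≠ 0)]
      rw [hk1, hk2, hcoll]
      have hlameq : (m : Int) + 1 - ((mu : Int) + 1) = (lam : Int) := by
        have hm' : m = mu + lam := hend
        subst hm'; push_cast; ring
      rw [hlameq]
    · -- m < mu + lam: fresh key, insert and continue
      have hnone : d.get? (f^[m] x) = none := by
        cases hop : d.get? (f^[m] x) with
        | none => rfl
        | some v =>
          exfalso
          obtain ⟨j, hj, hjeq⟩ := hI2 _ (by rw [hop]; rfl)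
          exact hnoearly j m hj hmid hjeq
      rw [hnone]
      simp only [Option.getD_none]
      rw [if_neg (by omega : ¬ ((0 : Int) ≠ 0))]
      obtain ⟨hk1, hk2⟩ := Prod.ext_iff.mp hkey
      dsimp only at hk1 hk2
      have hnode : (f^[m] x).1 = (pvW start_node node_to_neighbors instructions (m + 1)).1 := by
        rw [pvW_succ]
      have hsteps : (m : Int) + 1 = ((m + 1 : ℕ) : Int) := by push_cast; ring
      rw [hk1, hnode, hsteps]
      apply ih (m + 1) (d.insert (f^[m] x) ((m + 1 : ℕ) : Int))
      · omega
      · omega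
      · intro j hj
        rw [PySem.Dict.get?_insert]
        by_cases hjm : j = m
        · subst hjm
          rw [if_pos rfl]
          congr 1
        · have hj' : j < m := by omega
          rw [if_neg (fun hcon => hnoearly j m hj' hmid hcon)]
          exact hI1 j hj'
      · intro s hs
        rw [PySem.Dict.get?_insert] at hs
        by_cases hsm : s = f^[m] x
        · exact ⟨m, by omega, hsm.symm⟩
        · rw [if_neg hsm] at hs
          obtain ⟨j, hj, hjeq⟩ := hI2 s hs
          exact ⟨j, by omega, hjeq⟩

-- B's three loops
theorem pvBIterEq (f : String × Int → String × Int) :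
    ∀ (k : ℕ) (s : String × Int), bIter f k s = f^[k] s := by
  intro k
  induction k with
  | zero => intro s; rfl
  | succ k ih =>
    intro s
    show bIter f k (f s) = _
    rw [ih, ← Function.iterate_succ_apply]

theorem pvLamLoopCorrect (f : String × Int → String × Int) (x : String × Int) (mu lam M : ℕ)
    (hper : f^[mu + lam] x = f^[mu] x) (hpos : lam ≠ 0)
    (hlmin : ∀ p, p ≠ 0 → f^[mu + p] x = f^[mu] x → lam ≤ p)
    (hmuM : mu ≤ M) :
    ∀ (fuel c : ℕ), c ≠ 0 → c ≤ lam → lam ≤ c + fuel →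
      bLamLoop f fuel (f^[M] x) (f^[c] (f^[M] x)) (c : Int) = (lam : Int) := by
  intro fuel
  induction fuel with
  | zero =>
    intro c h1 h2 h3
    have : c = lam := by omega
    subst this; rfl
  | succ fuel ih =>
    intro c hc hcl hfuel
    show (if f^[c] (f^[M] x) = f^[M] x then (c : Int)
      else bLamLoop f fuel (f^[M] x) (f (f^[c] (f^[M] x))) ((c : Int) + 1)) = (lam : Int)
    have hMc : f^[c] (f^[M] x) = f^[c + M] x := by rw [Function.iterate_add_apply]
    rcases Nat.eq_or_lt_of_le hcl with hend | hmid
    · subst hend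
      rw [if_pos]
      rw [hMc]
      calc f^[c + M] x = f^[(mu + (M - mu)) + c] x := pvIterCongr f x (by omega)
        _ = f^[mu + (M - mu)] x := pvPeriodAt f x mu c hper (M - mu)
        _ = f^[M] x := pvIterCongr f x (by omega)
    · rw [if_neg]
      · have hstep : f (f^[c] (f^[M] x)) = f^[c + 1] (f^[M] x) := by
          rw [Function.iterate_succ_apply']
        have hcast : (c : Int) + 1 = ((c + 1 : ℕ) : Int) := by push_cast; ring
        rw [hstep, hcast]
        exact ih (c + 1) (by omega) (by omega) (by omega)
      · intro hcon
        rw [hMc] at hcon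
        have hdvd := pvEqDvd f x mu lam hper hpos hlmin hmuM (by omega : M ≤ c + M)
          (by rw [hcon] : f^[M] x = f^[c + M] x)
        have : lam ≤ c + M - M := Nat.le_of_dvd (by omega) hdvd
        omega

theorem pvMuLoopCorrect (f : String × Int → String × Int) (x : String × Int) (mu lam : ℕ)
    (hper : f^[mu + lam] x = f^[mu] x) (_hpos : lam ≠ 0)
    (hmumin : ∀ i, f^[i + lam] x = f^[i] x → mu ≤ i) :
    ∀ (fuel j : ℕ), j ≤ mu → mu ≤ j + fuel →
      bMuLoop f fuel (f^[j] x) (f^[j + lam] x) (j : Int) = (f^[mu] x, (mu : Int)) := by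
  intro fuel
  induction fuel with
  | zero =>
    intro j h1 h2
    have : j = mu := by omega
    subst this; rfl
  | succ fuel ih =>
    intro j hj hfuel
    show (if f^[j] x = f^[j + lam] x then (f^[j] x, (j : Int))
      else bMuLoop f fuel (f (f^[j] x)) (f (f^[j + lam] x)) ((j : Int) + 1))
      = (f^[mu] x, (mu : Int))
    rcases Nat.eq_or_lt_of_le hj with hend | hmid
    · subst hend
      rw [if_pos hper.symm]
    · rw [if_neg]
      · have h1 : f (f^[j] x) = f^[j + 1] x := by rw [Function.iterate_succ_apply']
        have h2 : f (f^[j + lam] x) = f^[(j + 1) + lam] x := by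
          rw [show (j + 1) + lam = (j + lam) + 1 from by omega,
            Function.iterate_succ_apply']
        have hcast : (j : Int) + 1 = ((j + 1 : ℕ) : Int) := by push_cast; ring
        rw [h1, h2, hcast]
        exact ih (j + 1) (by omega) (by omega)
      · intro hcon
        have := hmumin j hcon.symm
        omega

-- ===== VERDICT (by name: the statement is the Claim_ definition above) =====
theorem cycle_entry_data_spec : Claim_equal_cycle_entry_data := by
  intro start_node node_to_neighbors instructions _ hpre
  unfold Pre_cycle_entry_data at hpre
  rw [Bool.and_eq_true] at hpre
  obtain ⟨hne', hwf'⟩ := hpre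
  have hne : instructions.toList ≠ [] := by simpa using hne'
  have hwfAll : ∀ v ∈ pvReach node_to_neighbors instructions start_node (pvK node_to_neighbors),
      pvWfNode node_to_neighbors instructions v = true := List.all_eq_true.mp hwf'
  unfold Spec_cycle_entry_data
  set f := bStep node_to_neighbors instructions with hf
  set x := bStep node_to_neighbors instructions (start_node, 0) with hx
  set n := instructions.toList.length with hnn
  set M := node_to_neighbors.length * n with hM
  have hn : 0 < n := by
    have : n ≠ 0 := by simpa [hnn] using hne
    omega
  -- pigeonhole: among u 0 … u M two states coincide
  have hvalR : ∀ m : ℕ,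
      (f^[m] x).1 ∈ pvReach node_to_neighbors instructions start_node (pvK node_to_neighbors)
      ∧ 0 ≤ (f^[m] x).2 ∧ (f^[m] x).2 < (n : Int) := by
    intro m
    have := pvWValid start_node node_to_neighbors instructions hne hwfAll (m + 1)
    rwa [pvW_succ] at this
  have hval : ∀ m : ℕ, (f^[m] x).1 ∈ node_to_neighbors.map Prod.fst
      ∧ 0 ≤ (f^[m] x).2 ∧ (f^[m] x).2 < (n : Int) := by
    intro m
    obtain ⟨h1, h2, h3⟩ := hvalR m
    exact ⟨pvWfKey node_to_neighbors instructions _ (hwfAll _ h1), h2, h3⟩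
  have hcoll : ∃ i j : ℕ, i < j ∧ j ≤ M ∧ f^[i] x = f^[j] x := by
    have hmaps : ∀ a ∈ Finset.range (M + 1),
        (((f^[a] x).1, (f^[a] x).2.toNat))
          ∈ (node_to_neighbors.map Prod.fst).toFinset ×ˢ Finset.range n := by
      intro a _
      obtain ⟨hv1, hv2, hv3⟩ := hval a
      simp only [Finset.mem_product, List.mem_toFinset, Finset.mem_range]
      exact ⟨hv1, by omega⟩
    have hcard : ((node_to_neighbors.map Prod.fst).toFinset ×ˢ Finset.range n).card
        < (Finset.range (M + 1)).card := by
      rw [Finset.card_product, Finset.card_range, Finset.card_range]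
      have h1 : (node_to_neighbors.map Prod.fst).toFinset.card
          ≤ node_to_neighbors.length := by
        calc (node_to_neighbors.map Prod.fst).toFinset.card
            ≤ (node_to_neighbors.map Prod.fst).length := List.toFinset_card_le _
          _ = node_to_neighbors.length := by simp
      have : (node_to_neighbors.map Prod.fst).toFinset.card * n
          ≤ node_to_neighbors.length * n := Nat.mul_le_mul_right n h1
      omega
    obtain ⟨i, hi, j, hj, hne', heq⟩ :=
      Finset.exists_ne_map_eq_of_card_lt_of_maps_to hcard hmaps
    have hstates : f^[i] x = f^[j] x := by
      obtain ⟨_, hv2i', _⟩ := hval i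
      obtain ⟨_, hv2j', _⟩ := hval j
      have h1 : (f^[i] x).1 = (f^[j] x).1 := by
        have := congrArg Prod.fst heq; simpa using this
      have h2 : (f^[i] x).2.toNat = (f^[j] x).2.toNat := by
        have := congrArg Prod.snd heq; simpa using this
      have h2' : (f^[i] x).2 = (f^[j] x).2 := by omega
      exact Prod.ext h1 h2'
    simp only [Finset.mem_range] at hi hj
    rcases Nat.lt_or_ge i j with hlt | hge
    · exact ⟨i, j, hlt, by omega, hstates⟩
    · have : j < i := by omega
      exact ⟨j, i, this, by omega, hstates.symm⟩
  -- mu: the first index with a (bounded) later repetition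
  have hPex : ∃ m : ℕ, ∃ p : Fin (M + 1), p.val ≠ 0 ∧ f^[m + p.val] x = f^[m] x := by
    obtain ⟨i, j, hij, hjM, heq⟩ := hcoll
    exact ⟨i, ⟨j - i, by omega⟩, by simp; omega,
      by rw [pvIterCongr f x (by omega : i + (j - i) = j)]; exact heq.symm⟩
  set mu := Nat.find hPex with hmu
  have hmuspec := Nat.find_spec hPex
  have hmumin' : ∀ i p : ℕ, p ≠ 0 → p ≤ M → f^[i + p] x = f^[i] x → mu ≤ i := by
    intro i p hp hpM heq
    exact Nat.find_min' hPex ⟨⟨p, by omega⟩, hp, heq⟩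
  -- lam: the minimal period at mu
  obtain ⟨p0, hp0ne, hp0eq⟩ := hmuspec
  have hQex : ∃ p : ℕ, p ≠ 0 ∧ f^[mu + p] x = f^[mu] x := ⟨p0.val, hp0ne, hp0eq⟩
  set lam := Nat.find hQex with hlam
  obtain ⟨hpos, hper⟩ := Nat.find_spec hQex
  have hlmin : ∀ p, p ≠ 0 → f^[mu + p] x = f^[mu] x → lam ≤ p := by
    intro p hp heq
    exact Nat.find_min' hQex ⟨hp, heq⟩
  -- mu + lam ≤ M
  have hbound : mu + lam ≤ M := by
    obtain ⟨i, j, hij, hjM, heq⟩ := hcoll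
    have hmui : mu ≤ i := hmumin' i (j - i) (by omega) (by omega)
      (by rw [pvIterCongr f x (by omega : i + (j - i) = j)]; exact heq.symm)
    have hdvd := pvEqDvd f x mu lam hper hpos hlmin hmui (by omega) heq
    have := Nat.le_of_dvd (by omega) hdvd
    omega
  -- no repetition strictly before the first one
  have hnoearly : ∀ j m' : ℕ, j < m' → m' < mu + lam → f^[j] x ≠ f^[m'] x := by
    intro j m' hjm hm' hcon
    have hmuj : mu ≤ j := hmumin' j (m' - j) (by omega) (by omega)
      (by rw [pvIterCongr f x (by omega : j + (m' - j) = m')]; exact hcon.symm)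
    have hdvd := pvEqDvd f x mu lam hper hpos hlmin hmuj (by omega) hcon
    have := Nat.le_of_dvd (by omega) hdvd
    omega
  -- A's side
  have hA : cycle_entry_data start_node node_to_neighbors instructions
      = ((f^[mu] x).1, (f^[mu] x).2, (lam : Int), (mu : Int) + 1) := by
    unfold cycle_entry_data
    have h0 : start_node = (pvW start_node node_to_neighbors instructions 0).1 := rfl
    have hz : (0 : Int) = ((0 : ℕ) : Int) := rfl
    rw [show node_to_neighbors.length * instructions.toList.length = M from rfl]
    rw [h0, hz]
    exact pvALoopCorrect start_node node_to_neighbors instructions hne mu lam hper hpos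
      hlmin hnoearly (M + 1) 0 PySem.Dict.empty (by omega) (by omega)
      (by intro j hj; omega)
      (by intro s hs; rw [PySem.Dict.get?_empty] at hs; simp at hs)
  -- B's side
  have hB : cycle_entry_data_alt start_node node_to_neighbors instructions
      = ((f^[mu] x).1, (f^[mu] x).2, (lam : Int), (mu : Int) + 1) := by
    unfold cycle_entry_data_alt
    simp only [← hf, ← hnn, ← hM]
    rw [pvBIterEq f M x]
    have hlamres : bLamLoop f (M + 1) (f^[M] x) (f (f^[M] x)) 1 = (lam : Int) := by
      have h1 : f (f^[M] x) = f^[1] (f^[M] x) := rfl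
      have hone : (1 : Int) = ((1 : ℕ) : Int) := rfl
      rw [h1, hone]
      exact pvLamLoopCorrect f x mu lam M hper hpos hlmin (by omega) (M + 1) 1
        (by omega) (by omega) (by omega)
    rw [hlamres]
    have htn : ((lam : Int)).toNat = lam := Int.toNat_natCast lam
    rw [htn, pvBIterEq f lam x]
    have hmures : bMuLoop f (M + 1) x (f^[lam] x) 0 = (f^[mu] x, (mu : Int)) := by
      have h0 : x = f^[0] x := rfl
      have h0' : f^[lam] x = f^[0 + lam] x := pvIterCongr f x (by omega)
      have hz : (0 : Int) = ((0 : ℕ) : Int) := rfl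
      rw [hz]
      conv_lhs => rw [h0', h0]
      apply pvMuLoopCorrect f x mu lam hper hpos
      · intro i heq
        exact hmumin' i lam hpos (by omega) heq
      · omega
      · omega
    rw [hmures]
  rw [hA, hB]
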